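-- pv_equiv track=rewrite | github.com/cbohnert67/50_DAYS_OF_PYTHON | day45_analyze_strings.py | analyse_string
-- ===== SOURCE A (Python) =====
-- def analyse_string(string):
--     if not string:
--         return {"special character": 0, "words": 0, "total characters": 0}
--     special_characters = "#$%&'()*+,-./:;<=>?@[\]^_`{|}~"
--     special_count = 0
--     words = string.split()
--     word_count = len(words)
--     total_characters = len(string.replace(" ", ""))
--     for char in string:
--         if char in special_characters:
--             special_count += 1
--     return {"special character": special_count, "words": word_count, "total characters": total_characters}
--
-- string = "Python has a string format operator %. This functions analogously to printf format strings in C, e.g. 'spam=%s eggs=%d' % ('blah', 2) evaluates to 'spam=blah eggs=2'"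
-- ===== SOURCE B (Python) =====
-- def analyse_string(string):
--     if not string:
--         return {"special character": 0, "words": 0, "total characters": 0}
--     special_characters = "#$%&'()*+,-./:;<=>?@[\\]^_`{|}~"
--     special_count = word_count = total_characters = 0
--     in_word = False
--     for ch in string:
--         if ch in special_characters:
--             special_count += 1
--         if ch != " ":
--             total_characters += 1
--         if ch.isspace():
--             in_word = False
--         else:
--             if not in_word:
--                 word_count += 1
--             in_word = True
--     return {"special character": special_count, "words": word_count, "total characters": total_characters}
-- ===== Notes on version B (the rewrite author's own statement) =====
-- stated objective: alternative
-- what changed: B replaces A's three staged passes (split() for words, replace() for non-space length, a membership loop for specials) with one single left-to-right scan holding an accumulator (special count, word count via an in-word flag, non-space count).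
import Mathlib
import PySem

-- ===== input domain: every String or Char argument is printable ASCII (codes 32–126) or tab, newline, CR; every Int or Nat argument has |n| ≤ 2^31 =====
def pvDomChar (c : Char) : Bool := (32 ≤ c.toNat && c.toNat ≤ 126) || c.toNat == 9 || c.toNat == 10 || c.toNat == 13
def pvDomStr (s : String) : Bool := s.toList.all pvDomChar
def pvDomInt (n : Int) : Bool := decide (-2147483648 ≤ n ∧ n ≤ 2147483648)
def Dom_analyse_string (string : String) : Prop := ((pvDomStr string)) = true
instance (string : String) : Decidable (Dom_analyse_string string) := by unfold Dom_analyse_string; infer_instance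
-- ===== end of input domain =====

-- B computes all three counts in ONE scan of the string with an in-word flag,
-- instead of A's staged split()/replace()/membership-loop passes (objective: alternative).

-- the special-character alphabet (shared literal of both Pythons)
def specialChars : List Char := "#$%&'()*+,-./:;<=>?@[\\]^_`{|}~".toList

-- ===== PORT A =====
def analyse_string (string : String) : List (String × Int) :=
  if string = "" then
    [("special character", 0), ("words", 0), ("total characters", 0)]
  else
    let words := PySem.Str.split₀ string
    let word_count : Int := (words.length : Int)
    let total_characters : Int := PySem.Str.len (PySem.Str.replace string " " "")
    let special_count : Int :=
      string.toList.foldl (fun acc c => if specialChars.contains c then acc + 1 else acc) 0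
    [("special character", special_count), ("words", word_count),
     ("total characters", total_characters)]

-- ===== PORT B =====
-- one step of B's single scan: state = (special_count, word_count, total_characters, in_word)
def scanStep (st : Int × Int × Int × Bool) (c : Char) : Int × Int × Int × Bool :=
  let sp := if specialChars.contains c then st.1 + 1 else st.1
  let tc := if c = ' ' then st.2.2.1 else st.2.2.1 + 1
  if PySem.Chars.isspace c then (sp, st.2.1, tc, false)
  else (sp, (if st.2.2.2 then st.2.1 else st.2.1 + 1), tc, true)

def analyse_string_alt (string : String) : List (String × Int) :=
  if string = "" then
    [("special character", 0), ("words", 0), ("total characters", 0)]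
  else
    let r := string.toList.foldl scanStep (0, 0, 0, false)
    [("special character", r.1), ("words", r.2.1), ("total characters", r.2.2.1)]

-- ===== PRECONDITION & SPEC =====
def Spec_analyse_string (string : String) (out : List (String × Int)) : Prop := out = analyse_string_alt string
instance (string : String) (out : List (String × Int)) : Decidable (Spec_analyse_string string out) := by unfold Spec_analyse_string; infer_instance

-- ===== CLAIM (what is proved, stated in full; the proofs are below) =====
def Claim_equal_analyse_string : Prop := ∀ (string : String), Dom_analyse_string string → Spec_analyse_string string (analyse_string string)

-- ===== LEMMAS AND PROOFS =====

-- number of whitespace-separated words in l, given whether we are currently inside a word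
def runs : List Char → Bool → Nat
  | [], _ => 0
  | c :: t, inw =>
    if PySem.Chars.isspace c then runs t false
    else (if inw then 0 else 1) + runs t true

-- the in-word flag after scanning l
def endW : List Char → Bool → Bool
  | [], inw => inw
  | c :: t, _ => endW t (!PySem.Chars.isspace c)

-- split₀.go produces acc plus the pending word plus one word per run
lemma go_length (s : List Char) : ∀ (cur : List Char) (acc : List (List Char)),
    (PySem.Chars.split₀.go s cur acc).length
      = acc.length + (if cur.isEmpty then 0 else 1) + runs s (!cur.isEmpty) := by
  induction s with
  | nil =>
    intro cur acc
    by_cases h : cur.isEmpty <;> simp [PySem.Chars.split₀.go, h, runs]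
  | cons c t ih =>
    intro cur acc
    by_cases hs : PySem.Chars.isspace c
    · by_cases hc : cur.isEmpty
      · simp [PySem.Chars.split₀.go, hs, hc, ih, runs]
      · simp [PySem.Chars.split₀.go, hs, hc, ih, runs]; try omega
    · by_cases hc : cur.isEmpty
      all_goals (simp [PySem.Chars.split₀.go, hs, hc, ih, runs]; try omega)

lemma split₀_length (s : List Char) :
    (PySem.Chars.split₀ s).length = runs s false := by
  simpa using go_length s [] []

-- replace.go with old = " " , new = "" just drops the spaces
lemma rep_go_length (l : List Char) : ∀ (fuel : Nat) (acc : List Char),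
    l.length ≤ fuel →
    (PySem.Chars.replace.go [' '] [] fuel l acc).length
      = acc.length + l.countP (fun c => !(c == ' ')) := by
  induction l with
  | nil =>
    intro fuel acc _
    cases fuel <;> simp [PySem.Chars.replace.go]
  | cons c t ih =>
    intro fuel acc h
    cases fuel with
    | zero => simp at h
    | succ f =>
      by_cases hc : c = ' '
      · have : ([' '] : List Char).isPrefixOf (c :: t) = true := by
          simp [List.isPrefixOf, hc]
        simp [PySem.Chars.replace.go, hc,
          ih f acc (by simpa using Nat.le_of_succ_le_succ h)]
      · have : ([' '] : List Char).isPrefixOf (c :: t) = false := by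
          simp [List.isPrefixOf]; exact fun h' => (hc h'.symm).elim
        simp [PySem.Chars.replace.go, this, hc,
          ih f (c :: acc) (by simpa using Nat.le_of_succ_le_succ h)]
        omega

lemma replace_length (s : List Char) :
    (PySem.Chars.replace s [' '] []).length = s.countP (fun c => !(c == ' ')) := by
  simpa [PySem.Chars.replace] using rep_go_length s s.length [] (le_refl _)

-- the single scan computes the three counts and the final flag at once
set_option maxHeartbeats 1000000 in
lemma scan_loop (l : List Char) : ∀ (sp wc tc : Int) (inw : Bool),
    l.foldl scanStep (sp, wc, tc, inw)
      = (sp + (l.countP (fun c => decide (c ∈ specialChars)) : Int),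
         wc + (runs l inw : Int),
         tc + (l.countP (fun c => !(c == ' ')) : Int),
         endW l inw) := by
  induction l with
  | nil => intro sp wc tc inw; simp [runs, endW]
  | cons c t ih =>
    intro sp wc tc inw
    simp only [List.foldl_cons, scanStep, List.countP_cons, runs, endW,
      List.contains_eq_mem]
    split_ifs with hs hp hc hp hc hp hc hp hc <;>
      (rw [ih]; simp only [Prod.mk.injEq];
       refine ⟨by push_cast; try simp_all; try omega, by push_cast; try simp_all; try omega,
               by push_cast; try simp_all; try omega, by simp_all⟩)

-- ===== VERDICT (by name: the statement is the Claim_ definition above) =====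
theorem analyse_string_spec : Claim_equal_analyse_string := by
  intro s _
  unfold Spec_analyse_string analyse_string analyse_string_alt
  by_cases h : s = ""
  · simp [h]
  · simp only [if_neg h, scan_loop, PySem.Str.split₀, PySem.Str.replace, PySem.Str.len,
      String.toList_ofList, List.length_map, split₀_length]
    rw [PySem.List.foldl_if_add_one]
    have : (" " : String).toList = [' '] := by decide
    have h2 : ("" : String).toList = [] := by decide
    simp [this, h2, replace_length]
    exact List.countP_congr (fun c _ => by simp [List.contains_eq_mem])
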